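-- pv_equiv track=rewrite | github.com/Stitch3377/CodePath-TIP102 | session4.py | is_valid_itinerary
-- ===== SOURCE A (Python) =====
-- def is_valid_itinerary(itinerary):
--     """Problem 7"""
--     n = max(itinerary)
--
--     if len(itinerary) != (n + 1):
--         return False
--
--     freq = {}
--     for city in itinerary:
--         if city in freq:
--             freq[city] += 1
--         else:
--             freq[city] = 1
--
--     for i in range(1, n):
--         if freq.get(i) != 1:
--             return False
--
--     return freq.get(n) == 2
-- ===== SOURCE B (Python) =====
-- def is_valid_itinerary(itinerary):
--     """Problem 7"""
--     n = max(itinerary)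
--
--     if len(itinerary) != (n + 1):
--         return False
--
--     return sorted(itinerary) == list(range(1, n)) + [n, n]
-- ===== Notes on version B (the rewrite author's own statement) =====
-- stated objective: simpler
-- what changed: Replaced the frequency-dict build plus two count-check scans with a single sort-and-compare against the target multiset [1,...,n-1,n,n].
import Mathlib
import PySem

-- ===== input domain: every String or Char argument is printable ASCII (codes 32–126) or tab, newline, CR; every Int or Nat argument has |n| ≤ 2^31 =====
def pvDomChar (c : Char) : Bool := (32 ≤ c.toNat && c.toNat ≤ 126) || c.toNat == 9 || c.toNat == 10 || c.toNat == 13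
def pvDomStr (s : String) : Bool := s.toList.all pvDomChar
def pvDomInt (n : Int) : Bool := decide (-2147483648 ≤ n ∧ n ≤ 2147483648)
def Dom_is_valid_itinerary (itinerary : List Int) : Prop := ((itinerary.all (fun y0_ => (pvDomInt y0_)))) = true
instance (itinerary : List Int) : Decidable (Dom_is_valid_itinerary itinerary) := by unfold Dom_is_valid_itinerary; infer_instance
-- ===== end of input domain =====

-- B replaces A's frequency-dict counting with a sort-and-compare against the target list; objective: simpler.

-- ===== PORT A =====
def is_valid_itinerary (itinerary : List Int) : Bool :=
  match PySem.List.max? itinerary (fun x => x) with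
  | none => false      -- Python raises ValueError on an empty list; excluded by Pre_
  | some n =>
    if (PySem.List.len itinerary) ≠ n + 1 then false
    else
      let freq := itinerary.foldl
        (fun d city =>
          if d.contains city then d.insert city (d.getD city 0 + 1)
          else d.insert city 1)
        (PySem.Dict.empty : PySem.Dict Int Int)
      -- 'for i in range(1, n): if freq.get(i) != 1: return False' then 'return freq.get(n) == 2'
      ((PySem.List.pyRange 1 n 1).all (fun i => freq.get? i == some 1)) &&
        (freq.get? n == some 2)

-- ===== PORT B =====
def is_valid_itinerary_alt (itinerary : List Int) : Bool :=
  match PySem.List.max? itinerary (fun x => x) with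
  | none => false      -- Python raises ValueError on an empty list; excluded by Pre_
  | some n =>
    if (PySem.List.len itinerary) ≠ n + 1 then false
    else
      PySem.List.sorted itinerary (fun x => x) false ==
        PySem.List.pyRange 1 n 1 ++ [n, n]

-- ===== PRECONDITION & SPEC =====
-- Pre_ excludes exactly the empty list, on which Python A (max of an empty list) raises ValueError.
def Pre_is_valid_itinerary (itinerary : List Int) : Prop := itinerary ≠ []
instance (itinerary : List Int) : Decidable (Pre_is_valid_itinerary itinerary) := by
  unfold Pre_is_valid_itinerary; infer_instance
def pvWitness_is_valid_itinerary : List Int := [1, 3, 2, 3]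

def Spec_is_valid_itinerary (itinerary : List Int) (out : Bool) : Prop := out = is_valid_itinerary_alt itinerary
instance (itinerary : List Int) (out : Bool) : Decidable (Spec_is_valid_itinerary itinerary out) := by unfold Spec_is_valid_itinerary; infer_instance

-- ===== CLAIM (what is proved, stated in full; the proofs are below) =====
def Claim_equal_is_valid_itinerary : Prop := ∀ (itinerary : List Int), Dom_is_valid_itinerary itinerary → Pre_is_valid_itinerary itinerary → Spec_is_valid_itinerary itinerary (is_valid_itinerary itinerary)

-- ===== LEMMAS AND PROOFS =====

-- A's branching frequency loop builds exactly the counter.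
theorem freq_eq_counter (xs : List Int) :
    xs.foldl
      (fun d city =>
        if d.contains city then d.insert city (d.getD city 0 + 1)
        else d.insert city 1)
      PySem.Dict.empty = PySem.Dict.counter xs := by
  rw [← PySem.Dict.foldl_insert_getD_add_one_eq_counter]
  congr 1
  funext d city
  by_cases h : d.contains city = true
  · simp [h]
  · have h0 := PySem.Dict.getD_of_not_contains d (0 : Int) (by simpa using h)
    simp [h, h0]

theorem get?_counter_eq_some_iff (xs : List Int) (v c : Int) :
    (PySem.Dict.counter xs).get? v = some c ↔ (xs.count v : Int) = c ∧ v ∈ xs := by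
  constructor
  · intro h
    have hg : (PySem.Dict.counter xs).getD v 0 = c := PySem.Dict.getD_of_get?_eq_some _ (0 : Int) h
    rw [PySem.Dict.getD_counter] at hg
    have hmem : v ∈ (PySem.Dict.counter xs).keys := by
      rw [← PySem.Dict.contains_iff_mem_keys]
      rw [PySem.Dict.contains_eq_isSome_get?, h]
      rfl
    rw [PySem.Dict.keys_counter] at hmem
    exact ⟨hg, (PySem.Set.mem_ofList _ _).mp hmem⟩
  · rintro ⟨hc, hv⟩
    have hmem : v ∈ (PySem.Dict.counter xs).keys := by
      rw [PySem.Dict.keys_counter]; exact (PySem.Set.mem_ofList _ _).mpr hv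
    rw [← PySem.Dict.contains_iff_mem_keys] at hmem
    rcases hso : (PySem.Dict.counter xs).get? v with _ | c'
    · rw [PySem.Dict.contains_eq_isSome_get?, hso] at hmem; simp at hmem
    · have hgd := PySem.Dict.getD_of_get?_eq_some (PySem.Dict.counter xs) (0 : Int) hso
      rw [PySem.Dict.getD_counter] at hgd
      have hcc : c' = c := by omega
      rw [hcc]

-- count of v in the target list range(1,n) ++ [n,n]
theorem count_target (n v : Int) :
    (PySem.List.pyRange 1 n 1 ++ [n, n]).count v =
      if v = n then 2 else if 1 ≤ v ∧ v < n then 1 else 0 := by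
  rw [List.count_append]
  have hr : (PySem.List.pyRange 1 n 1).count v = if 1 ≤ v ∧ v < n then 1 else 0 := by
    by_cases h : 1 ≤ v ∧ v < n
    · have hmem : v ∈ PySem.List.pyRange 1 n 1 := (PySem.List.mem_pyRange_one).mpr h
      have h1 : 1 ≤ (PySem.List.pyRange 1 n 1).count v := List.one_le_count_iff.mpr hmem
      have h2 : (PySem.List.pyRange 1 n 1).count v ≤ 1 :=
        List.nodup_iff_count_le_one.mp (PySem.List.nodup_pyRange_one 1 n) v
      rw [if_pos h]; omega
    · have hnm : v ∉ PySem.List.pyRange 1 n 1 := fun hm => h ((PySem.List.mem_pyRange_one).mp hm)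
      simp [h, List.count_eq_zero.mpr hnm]
  rw [hr]
  by_cases hv : v = n
  · simp [hv]
  · simp [hv, Ne.symm hv]

-- the multiset characterisation shared by both programs, under the length guard
theorem core_iff (xs : List Int) (n : Int) (hlen : (xs.length : Int) = n + 1) :
    ((∀ i : Int, 1 ≤ i → i < n → xs.count i = 1) ∧ xs.count n = 2) ↔
      xs.Perm (PySem.List.pyRange 1 n 1 ++ [n, n]) := by
  constructor
  · rintro ⟨h1, h2⟩
    have hsub : (PySem.List.pyRange 1 n 1 ++ [n, n]).Subperm xs := by
      rw [List.subperm_ext_iff]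
      intro x hx
      rw [count_target]
      rcases List.mem_append.mp hx with hx | hx
      · obtain ⟨ha, hb⟩ := (PySem.List.mem_pyRange_one).mp hx
        have hne : ¬ x = n := by omega
        simp only [hne, if_false, ha, hb, and_self, if_true]
        rw [h1 x ha hb]
      · have hx : x = n := by simpa using hx
        subst hx
        simp [h2]
    have hle := hsub.length_le
    have hn2 : 2 ≤ xs.length := le_trans (by omega) (List.count_le_length (l := xs) (a := n))
    have hlt : xs.length ≤ (PySem.List.pyRange 1 n 1 ++ [n, n]).length := by
      rw [List.length_append, PySem.List.length_pyRange_one]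
      simp only [List.length_cons, List.length_nil]
      omega
    exact (hsub.perm_of_length_le hlt).symm
  · intro hp
    refine ⟨fun i hi1 hi2 => ?_, ?_⟩
    · rw [hp.count_eq, count_target]
      have hne : ¬ i = n := by omega
      simp [hne, hi1, hi2]
    · rw [hp.count_eq, count_target]
      simp

-- the target list is its own sorted form
theorem sorted_target (n : Int) :
    PySem.List.sorted (PySem.List.pyRange 1 n 1 ++ [n, n]) (fun x => x) false =
      PySem.List.pyRange 1 n 1 ++ [n, n] := by
  apply PySem.List.sorted_eq_self_of_pairwise
  rw [List.pairwise_append]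
  refine ⟨(PySem.List.pairwise_lt_pyRange_one 1 n).imp (fun h => le_of_lt h), by simp, ?_⟩
  intro a ha b hb
  have h1 := (PySem.List.mem_pyRange_one).mp ha
  have hb' : b = n := by simpa using hb
  omega

-- ===== VERDICT (by name: the statement is the Claim_ definition above) =====
theorem is_valid_itinerary_spec : Claim_equal_is_valid_itinerary := by
  intro xs _ hpre
  unfold Spec_is_valid_itinerary is_valid_itinerary is_valid_itinerary_alt
  rcases hmax : PySem.List.max? xs (fun x => x) with _ | n
  · exact absurd ((PySem.List.max?_eq_none_iff xs (fun x => x)).mp hmax) hpre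
  · dsimp only
    rw [PySem.List.len_eq]
    by_cases hlen' : (xs.length : Int) = n + 1
    · rw [if_neg (not_not_intro hlen'), if_neg (not_not_intro hlen')]
      simp only [freq_eq_counter]
      rw [Bool.eq_iff_iff, Bool.and_eq_true, List.all_eq_true]
      simp only [beq_iff_eq]
      have hnmem : n ∈ xs := PySem.List.max?_mem hmax
      have hA : ((∀ i ∈ PySem.List.pyRange 1 n 1,
            (PySem.Dict.counter xs).get? i = some 1) ∧
            (PySem.Dict.counter xs).get? n = some 2) ↔
          ((∀ i : Int, 1 ≤ i → i < n → xs.count i = 1) ∧ xs.count n = 2) := by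
        constructor
        · rintro ⟨ha, hb⟩
          refine ⟨fun i hi1 hi2 => ?_, ?_⟩
          · have h := ha i ((PySem.List.mem_pyRange_one).mpr ⟨hi1, hi2⟩)
            rw [get?_counter_eq_some_iff] at h
            omega
          · rw [get?_counter_eq_some_iff] at hb
            omega
        · rintro ⟨ha, hb⟩
          constructor
          · intro i hi
            obtain ⟨hi1, hi2⟩ := (PySem.List.mem_pyRange_one).mp hi
            rw [get?_counter_eq_some_iff]
            refine ⟨by rw [ha i hi1 hi2]; rfl, ?_⟩
            rw [← List.one_le_count_iff, ha i hi1 hi2]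
          · rw [get?_counter_eq_some_iff]
            exact ⟨by rw [hb]; rfl, hnmem⟩
      rw [hA, core_iff xs n hlen']
      constructor
      · intro hp
        rw [PySem.List.sorted_eq_sorted_of_perm xs _ (fun x => x) (fun a b h => h) hp,
          sorted_target]
      · intro h
        exact (h ▸ PySem.List.sorted_perm xs (fun x => x) false).symm
    · rw [if_pos hlen', if_pos hlen']
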